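-- pv_equiv track=rewrite | github.com/YuujiKamura/SUMMARYGENERATOR | src/utils/thermometer_utils.py | select_thermometer_remark
-- ===== SOURCE A (Python) =====
-- def thermometer_remarks_index(idx, group_size=3, num_candidates=4):
--     return (idx // group_size) % num_candidates
--
-- def select_thermometer_remark(candidates_list):
--     selected = []
--     for idx, candidates in enumerate(candidates_list):
--         sel_idx = thermometer_remarks_index(idx)
--         if candidates and len(candidates) > sel_idx:
--             selected.append(candidates[sel_idx])
--         else:
--             selected.append(None)
--     return selected
-- ===== SOURCE B (Python) =====
-- def select_thermometer_remark(candidates_list):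
--     # The selection index repeats with period group_size * num_candidates = 12:
--     # one period is [0,0,0, 1,1,1, 2,2,2, 3,3,3]. Zip that table against
--     # 12-element chunks of the input; no index arithmetic needed.
--     pattern = [i for i in range(4) for _ in range(3)]
--     selected = []
--     rest = candidates_list
--     while rest:
--         chunk, rest = rest[:12], rest[12:]
--         for sel_idx, candidates in zip(pattern, chunk):
--             if candidates and len(candidates) > sel_idx:
--                 selected.append(candidates[sel_idx])
--             else:
--                 selected.append(None)
--     return selected
-- ===== Notes on version B (the rewrite author's own statement) =====
-- stated objective: alternative
-- what changed: B replaces A's per-element index formula (idx//3)%4 by a precomputed period-12 pattern table [0,0,0,1,1,1,2,2,2,3,3,3] zipped against 12-element chunks of the input, eliminating all division/modulo arithmetic.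
import Mathlib
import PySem

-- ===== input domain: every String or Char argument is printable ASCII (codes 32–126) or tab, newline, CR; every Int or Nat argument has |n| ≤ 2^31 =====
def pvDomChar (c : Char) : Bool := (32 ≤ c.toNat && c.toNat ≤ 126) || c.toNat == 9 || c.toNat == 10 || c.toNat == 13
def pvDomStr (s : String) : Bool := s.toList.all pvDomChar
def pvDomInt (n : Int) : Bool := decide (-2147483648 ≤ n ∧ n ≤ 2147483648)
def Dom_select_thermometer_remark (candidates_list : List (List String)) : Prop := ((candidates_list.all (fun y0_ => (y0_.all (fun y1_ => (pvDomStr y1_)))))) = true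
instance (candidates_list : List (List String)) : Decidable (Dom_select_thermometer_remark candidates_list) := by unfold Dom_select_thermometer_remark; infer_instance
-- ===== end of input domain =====

-- B replaces A's per-element formula (idx // 3) % 4 by a precomputed period-12 pattern
-- table zipped against 12-element chunks; same O(n) cost (objective: alternative).

-- ===== PORT A =====
-- thermometer_remarks_index(idx) with the default group_size=3, num_candidates=4
def thermometer_remarks_index (idx : Int) : Int :=
  PySem.Int.mod (PySem.Int.floordiv idx 3) 4

def select_thermometer_remark (candidates_list : List (List String)) : List (Option String) :=
  (PySem.List.enumerate candidates_list).foldl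
    (fun selected p =>
      let sel_idx := thermometer_remarks_index p.1
      if p.2 ≠ [] ∧ sel_idx < (p.2.length : Int) then
        selected ++ [PySem.List.pyGet? p.2 sel_idx]   -- guard makes the index in range; pyGet? = some candidates[sel_idx]
      else
        selected ++ [none])
    []

-- ===== PORT B =====
-- pattern = [i for i in range(4) for _ in range(3)] : one full period of selection indices
def pvPattern : List Nat := (List.range 4).flatMap (fun i => List.replicate 3 i)

-- body of Source B's inner for-loop, for one (sel_idx, candidates) pair of the zip
def pvPick (p : Nat × List String) : Option String :=
  if p.2 ≠ [] ∧ p.1 < p.2.length then PySem.List.pyGet? p.2 ((p.1 : Nat) : Int) else none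

-- Source B's while loop: peel rest[:12], zip it with the pattern, recurse on rest[12:]
def pvAltGo : List (List String) → List (Option String)
  | [] => []
  | x :: xs =>
      ((pvPattern.zip ((x :: xs).take 12)).map pvPick) ++ pvAltGo ((x :: xs).drop 12)
  termination_by xs => xs.length
  decreasing_by simp

def select_thermometer_remark_alt (candidates_list : List (List String)) : List (Option String) :=
  pvAltGo candidates_list

-- ===== PRECONDITION & SPEC =====
def Spec_select_thermometer_remark (candidates_list : List (List String)) (out : List (Option String)) : Prop := out = select_thermometer_remark_alt candidates_list
instance (candidates_list : List (List String)) (out : List (Option String)) : Decidable (Spec_select_thermometer_remark candidates_list out) := by unfold Spec_select_thermometer_remark; infer_instance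

-- ===== CLAIM (what is proved, stated in full; the proofs are below) =====
def Claim_equal_select_thermometer_remark : Prop := ∀ (candidates_list : List (List String)), Dom_select_thermometer_remark candidates_list → Spec_select_thermometer_remark candidates_list (select_thermometer_remark candidates_list)

-- ===== LEMMAS AND PROOFS =====

-- A's per-element function, as a map over the enumerated list
def pvFA (p : Int × List String) : Option String :=
  let sel_idx := thermometer_remarks_index p.1
  if p.2 ≠ [] ∧ sel_idx < (p.2.length : Int) then PySem.List.pyGet? p.2 sel_idx else none

theorem pvA_eq_map (l : List (List String)) :
    select_thermometer_remark l = (PySem.List.enumerate l).map pvFA := by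
  unfold select_thermometer_remark
  have h : ∀ (acc : List (Option String)) (e : List (Int × List String)),
      e.foldl (fun selected p =>
        let sel_idx := thermometer_remarks_index p.1
        if p.2 ≠ [] ∧ sel_idx < (p.2.length : Int) then
          selected ++ [PySem.List.pyGet? p.2 sel_idx]
        else selected ++ [none]) acc = acc ++ e.map pvFA := by
    intro acc e
    induction e generalizing acc with
    | nil => simp
    | cons p e ih => simp [ih, pvFA]; split <;> simp
  simpa using h [] (PySem.List.enumerate l)

-- at absolute index 12*m+k (k < 12) A's sel_idx is k / 3, the pattern entry at k
theorem pvFA_eq_pick (m k : Nat) (hk : k < 12) (c : List String) :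
    pvFA (((12 * m + k : Nat) : Int), c) = pvPick (k / 3, c) := by
  have hsel : thermometer_remarks_index ((12 * m + k : Nat) : Int) = ((k / 3 : Nat) : Int) := by
    unfold thermometer_remarks_index
    rw [show (3 : Int) = ((3 : Nat) : Int) from rfl, PySem.Int.floordiv_natCast,
        show (4 : Int) = ((4 : Nat) : Int) from rfl, PySem.Int.mod_natCast]
    congr 1; omega
  have hcast : (((k / 3 : Nat) : Int) < (c.length : Int)) ↔ k / 3 < c.length := by omega
  simp only [pvFA, pvPick, hsel, hcast]

-- stepping one position into the pattern table
theorem pvPattern_drop (k : Nat) (hk : k < 12) :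
    pvPattern.drop k = (k / 3) :: pvPattern.drop (k + 1) := by
  interval_cases k <;> decide

-- a (possibly final, short) chunk of length ≤ 12 starting at absolute index 12*m+k
theorem pv_chunk_map (m : Nat) :
    ∀ (l : List (List String)) (k : Nat), l.length + k ≤ 12 →
      (PySem.List.enumerate l ((12 * m + k : Nat) : Int)).map pvFA
        = ((pvPattern.drop k).zip l).map pvPick := by
  intro l
  induction l with
  | nil => intro k _; simp [PySem.List.enumerate_nil]
  | cons c l ih =>
      intro k hk
      have hk12 : k < 12 := by simp at hk; omega
      rw [PySem.List.enumerate_cons, pvPattern_drop k hk12]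
      have h1 : ((12 * m + k : Nat) : Int) + 1 = ((12 * m + (k + 1) : Nat) : Int) := by
        push_cast; ring
      simp only [List.map_cons, List.zip_cons_cons, h1]
      rw [ih (k + 1) (by simp at hk; omega), pvFA_eq_pick m k hk12]

theorem pvAltGo_eq_aux : ∀ (n : Nat) (l : List (List String)) (m : Nat), l.length ≤ n →
    pvAltGo l = (PySem.List.enumerate l ((12 * m : Nat) : Int)).map pvFA := by
  intro n
  induction n with
  | zero =>
      intro l m h
      have : l = [] := List.eq_nil_of_length_eq_zero (by omega)
      subst this; simp [pvAltGo, PySem.List.enumerate_nil]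
  | succ n ih =>
      intro l m h
      rcases l with _ | ⟨x, xs⟩
      · simp [pvAltGo, PySem.List.enumerate_nil]
      · rw [pvAltGo]
        rw [show (x :: xs) = (x :: xs).take 12 ++ (x :: xs).drop 12 by simp,
            PySem.List.enumerate_append, List.map_append]
        have hx : ((x :: xs).take 12 ++ (x :: xs).drop 12).take 12 = (x :: xs).take 12 := by simp
        have hd : ((x :: xs).take 12 ++ (x :: xs).drop 12).drop 12 = (x :: xs).drop 12 := by
          by_cases h12 : (x :: xs).length ≤ 12
          · rw [List.drop_eq_nil_of_le h12, List.append_nil,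
                List.drop_eq_nil_of_le (by simp only [List.length_take]; omega)]
          · rw [List.drop_append_of_le_length (by simp only [List.length_take]; omega)]
            have : ((x :: xs).take 12).length = 12 := by simp only [List.length_take]; omega
            rw [List.drop_eq_nil_of_le (le_of_eq this), List.nil_append]
        rw [hx, hd, ih ((x :: xs).drop 12) (m + 1) (by simp at h ⊢; omega)]
        have hblock : (PySem.List.enumerate ((x :: xs).take 12) ((12 * m : Nat) : Int)).map pvFA
            = (pvPattern.zip ((x :: xs).take 12)).map pvPick := by
          have h0 : ((12 * m : Nat) : Int) = ((12 * m + 0 : Nat) : Int) := by norm_num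
          rw [h0, pv_chunk_map m _ 0 (by simp only [List.length_take]; omega)]
          rfl
        rw [hblock]
        by_cases h12 : (x :: xs).length ≤ 12
        · rw [List.drop_eq_nil_of_le h12]
          simp [PySem.List.enumerate_nil]
        · have hstart : ((12 * m : Nat) : Int) + ((((x :: xs).take 12).length : Nat) : Int)
              = ((12 * (m + 1) : Nat) : Int) := by
            have hlen : ((x :: xs).take 12).length = 12 := by simp only [List.length_take]; omega
            rw [hlen]; push_cast; ring
          rw [hstart]

theorem select_thermometer_remark_equal (l : List (List String)) :
    select_thermometer_remark l = select_thermometer_remark_alt l := by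
  rw [pvA_eq_map, select_thermometer_remark_alt,
      pvAltGo_eq_aux l.length l 0 le_rfl]
  norm_num

-- ===== VERDICT (by name: the statement is the Claim_ definition above) =====
theorem select_thermometer_remark_spec : Claim_equal_select_thermometer_remark := by
  intro l _
  unfold Spec_select_thermometer_remark
  exact select_thermometer_remark_equal l
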